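-- pv_equiv track=rewrite | github.com/artiom-zayats/Grokking-the-Coding-Interview-Patterns-for-Coding-Questions | 11. Pattern Modified Binary Search/Minimum Difference Element (medium).py | search_min_diff_element
-- ===== SOURCE A (Python) =====
-- def search_min_diff_element(arr, key):
--   #TODO my code
--   l,r = 0,len(arr)-1
--   mn = (float("inf"),-1)
--   while l<=r:
--     mid = (l+r)//2
--     diff = arr[mid]-key
--     if abs(diff) < mn[0]:
--       mn = abs(diff),mid
--     if diff == 0:
--       break
--     if diff < 0 :
--       l = mid +1
--     else:
--       r = mid - 1
--
--   return arr[mn[1]]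
-- ===== SOURCE B (Python) =====
-- def search_min_diff_element(arr, key):
--   # Recursive binary search; no running-minimum state. Each call returns the
--   # closest value found in its probe path (ties resolved toward the earlier probe).
--   def go(l, r):
--     if l > r:
--       return None
--     mid = (l + r) // 2
--     v = arr[mid]
--     if v == key:
--       return v
--     rest = go(mid + 1, r) if v < key else go(l, mid - 1)
--     return v if rest is None or abs(v - key) <= abs(rest - key) else rest
--   return go(0, len(arr) - 1)
-- ===== Notes on version B (the rewrite author's own statement) =====
-- stated objective: simpler
-- what changed: B replaces A's while-loop with its running (min-diff, index) accumulator and float('inf') sentinel by a recursive binary search that carries no state: each call returns the closest value on its probe path, combined on the way back with a tie toward the earlier probe.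
import Mathlib
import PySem

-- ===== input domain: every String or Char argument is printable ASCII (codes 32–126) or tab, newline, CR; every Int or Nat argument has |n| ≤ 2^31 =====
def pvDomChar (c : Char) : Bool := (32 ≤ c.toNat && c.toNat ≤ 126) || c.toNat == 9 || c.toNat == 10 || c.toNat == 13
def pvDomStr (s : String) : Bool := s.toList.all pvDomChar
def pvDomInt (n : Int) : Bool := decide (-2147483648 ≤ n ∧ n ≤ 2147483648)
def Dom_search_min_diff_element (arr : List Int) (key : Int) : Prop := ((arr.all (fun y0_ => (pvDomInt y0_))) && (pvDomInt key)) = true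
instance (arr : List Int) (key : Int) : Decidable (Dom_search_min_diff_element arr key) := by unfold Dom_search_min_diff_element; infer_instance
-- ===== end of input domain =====

-- B replaces A's while-loop with its running (min-diff, index) accumulator by a stateless
-- recursive binary search that combines results on the way back (simpler).

-- ===== PORT A =====
-- A's while-loop; mn : Option (Int × Int) represents A's pair, none ↔ the initial (float("inf"), -1)
-- (the comparison 'abs(diff) < inf' is always true, so none always improves — exact).
def pvAloop (arr : List Int) (key : Int) (l r : Int) (mn : Option (Int × Int)) :
    Option (Int × Int) :=
  if h : l ≤ r then
    let mid := PySem.Int.floordiv (l + r) 2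
    let diff := PySem.List.pyGetD arr mid 0 - key
    let mn' := match mn with
      | none => some (|diff|, mid)
      | some (d, i) => if |diff| < d then some (|diff|, mid) else some (d, i)
    if diff = 0 then mn'
    else if diff < 0 then pvAloop arr key (mid + 1) r mn'
    else pvAloop arr key l (mid - 1) mn'
  else mn
termination_by (r + 1 - l).toNat
decreasing_by
  · have := PySem.Int.floordiv_two_mid_bounds h
    omega
  · have := PySem.Int.floordiv_two_mid_bounds h
    omega

-- final 'return arr[mn[1]]'; with mn untouched the index is -1 (on the empty list Python raises
-- IndexError there — excluded by Pre_; pyGetD's default is never returned on Pre_ inputs)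
def search_min_diff_element (arr : List Int) (key : Int) : Int :=
  match pvAloop arr key 0 ((arr.length : Int) - 1) none with
  | some (_, i) => PySem.List.pyGetD arr i 0
  | none => PySem.List.pyGetD arr (-1) 0

-- ===== PORT B =====
-- B's inner recursive go(l, r); None ↔ none
def pvBgo (arr : List Int) (key : Int) (l r : Int) : Option Int :=
  if h : l ≤ r then
    let mid := PySem.Int.floordiv (l + r) 2
    let v := PySem.List.pyGetD arr mid 0
    if v = key then some v
    else
      let rest := if v < key then pvBgo arr key (mid + 1) r else pvBgo arr key l (mid - 1)
      match rest with
      | none => some v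
      | some rv => if |v - key| ≤ |rv - key| then some v else some rv
  else none
termination_by (r + 1 - l).toNat
decreasing_by
  · have := PySem.Int.floordiv_two_mid_bounds h
    omega
  · have := PySem.Int.floordiv_two_mid_bounds h
    omega

-- Python B returns None only on the empty list (outside Pre_); getD 0 stands in for that None
def search_min_diff_element_alt (arr : List Int) (key : Int) : Int :=
  (pvBgo arr key 0 ((arr.length : Int) - 1)).getD 0

-- ===== PRECONDITION & SPEC =====
-- Pre_ excludes only the empty list, on which A raises IndexError (arr[-1]) and B returns None.
def Pre_search_min_diff_element (arr : List Int) (key : Int) : Prop := arr ≠ []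
instance (arr : List Int) (key : Int) : Decidable (Pre_search_min_diff_element arr key) := by
  unfold Pre_search_min_diff_element; infer_instance

def pvWitness_search_min_diff_element : List Int × Int := ([1, 5, 9], 6)

def Spec_search_min_diff_element (arr : List Int) (key : Int) (out : Int) : Prop :=
  out = search_min_diff_element_alt arr key
instance (arr : List Int) (key : Int) (out : Int) :
    Decidable (Spec_search_min_diff_element arr key out) := by
  unfold Spec_search_min_diff_element; infer_instance

-- ===== CLAIM (what is proved, stated in full; the proofs are below) =====
def Claim_equal_search_min_diff_element : Prop :=
  ∀ (arr : List Int) (key : Int), Dom_search_min_diff_element arr key →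
    Pre_search_min_diff_element arr key →
    Spec_search_min_diff_element arr key (search_min_diff_element arr key)

-- ===== LEMMAS AND PROOFS =====

-- arr[i] for a proof-side index
def pvG (arr : List Int) (i : Int) : Int := PySem.List.pyGetD arr i 0

-- A's return expression as a function of the final mn
def pvARet (arr : List Int) (mn : Option (Int × Int)) : Int :=
  match mn with
  | some (_, i) => PySem.List.pyGetD arr i 0
  | none => PySem.List.pyGetD arr (-1) 0

-- one step of A's accumulator update (A's 'if abs(diff) < mn[0]' with mn's match folded)
def pvMnUp (arr : List Int) (key : Int) (mid : Int) (mn : Option (Int × Int)) :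
    Option (Int × Int) :=
  match mn with
  | none => some (|pvG arr mid - key|, mid)
  | some (d, i) => if |pvG arr mid - key| < d then some (|pvG arr mid - key|, mid) else some (d, i)

-- how A's pending accumulator combines with the best of the remaining probe path
def pvComb (arr : List Int) (key : Int) (mn : Option (Int × Int)) (res : Option Int) : Int :=
  match mn, res with
  | none, none => PySem.List.pyGetD arr (-1) 0
  | none, some v => v
  | some (_, i), none => pvG arr i
  | some (d, i), some v => if |v - key| < d then v else pvG arr i

lemma pvMnUp_none (arr : List Int) (key mid : Int) :
    pvMnUp arr key mid none = some (|pvG arr mid - key|, mid) := rfl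

lemma pvMnUp_some (arr : List Int) (key mid d i : Int) :
    pvMnUp arr key mid (some (d, i)) =
      if |pvG arr mid - key| < d then some (|pvG arr mid - key|, mid) else some (d, i) := rfl

lemma pvComb_none_some (arr : List Int) (key v : Int) :
    pvComb arr key none (some v) = v := rfl

lemma pvComb_some_none (arr : List Int) (key d i : Int) :
    pvComb arr key (some (d, i)) none = pvG arr i := rfl

lemma pvComb_some_some (arr : List Int) (key d i v : Int) :
    pvComb arr key (some (d, i)) (some v) = if |v - key| < d then v else pvG arr i := rfl

lemma pvAloop_step (arr : List Int) (key l r : Int) (mn : Option (Int × Int)) (h : l ≤ r)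
    (mid : Int) (hm : mid = PySem.Int.floordiv (l + r) 2) :
    pvAloop arr key l r mn =
      if pvG arr mid - key = 0 then pvMnUp arr key mid mn
      else if pvG arr mid - key < 0 then pvAloop arr key (mid + 1) r (pvMnUp arr key mid mn)
      else pvAloop arr key l (mid - 1) (pvMnUp arr key mid mn) := by
  subst hm
  rw [pvAloop.eq_def]
  cases mn <;> simp [h, pvG, pvMnUp]

lemma pvAloop_end (arr : List Int) (key l r : Int) (mn : Option (Int × Int)) (h : ¬ l ≤ r) :
    pvAloop arr key l r mn = mn := by
  rw [pvAloop.eq_def]; simp [h]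

lemma pvBgo_step (arr : List Int) (key l r : Int) (h : l ≤ r)
    (mid : Int) (hm : mid = PySem.Int.floordiv (l + r) 2) :
    pvBgo arr key l r =
      if pvG arr mid = key then some (pvG arr mid)
      else
        match (if pvG arr mid < key then pvBgo arr key (mid + 1) r
               else pvBgo arr key l (mid - 1)) with
        | none => some (pvG arr mid)
        | some rv => if |pvG arr mid - key| ≤ |rv - key| then some (pvG arr mid) else some rv := by
  subst hm
  rw [pvBgo.eq_def]
  simp [h, pvG]

lemma pvBgo_end (arr : List Int) (key l r : Int) (h : ¬ l ≤ r) :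
    pvBgo arr key l r = none := by
  rw [pvBgo.eq_def]; simp [h]

lemma pvBgo_isSome (arr : List Int) (key : Int) :
    ∀ (m : Nat) (l r : Int), (r + 1 - l).toNat ≤ m → l ≤ r → (pvBgo arr key l r).isSome := by
  intro m
  induction m with
  | zero => intro l r hm hle; omega
  | succ m ih =>
    intro l r hm hle
    obtain ⟨hml, hmr⟩ := PySem.Int.floordiv_two_mid_bounds hle
    rw [pvBgo_step arr key l r hle _ rfl]
    set mid := PySem.Int.floordiv (l + r) 2 with hmid
    split_ifs with h1 h2
    · rfl
    · cases pvBgo arr key (mid + 1) r with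
      | none => rfl
      | some rv => dsimp only; split_ifs <;> rfl
    · cases pvBgo arr key l (mid - 1) with
      | none => rfl
      | some rv => dsimp only; split_ifs <;> rfl

-- A's loop with pending accumulator mn computes: B's best over the remaining probe path,
-- combined with mn (strict improvement, first probe wins ties).
lemma pv_main (arr : List Int) (key : Int) :
    ∀ (m : Nat) (l r : Int) (mn : Option (Int × Int)), (r + 1 - l).toNat ≤ m →
    pvARet arr (pvAloop arr key l r mn) = pvComb arr key mn (pvBgo arr key l r) := by
  intro m
  induction m with
  | zero =>
    intro l r mn hm
    have h : ¬ l ≤ r := by omega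
    rw [pvAloop_end arr key l r mn h, pvBgo_end arr key l r h]
    cases mn with
    | none => rfl
    | some p => obtain ⟨d, i⟩ := p; rfl
  | succ m ih =>
    intro l r mn hm
    by_cases hle : l ≤ r
    · obtain ⟨hml, hmr⟩ := PySem.Int.floordiv_two_mid_bounds hle
      rw [pvAloop_step arr key l r mn hle _ rfl, pvBgo_step arr key l r hle _ rfl]
      set mid := PySem.Int.floordiv (l + r) 2 with hmid
      rcases lt_trichotomy (pvG arr mid) key with hc | hc | hc
      · -- arr[mid] < key: both recurse right
        rw [if_neg (by omega), if_pos (by omega), if_neg (by omega), if_pos hc,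
          ih (mid + 1) r (pvMnUp arr key mid mn) (by omega)]
        generalize pvBgo arr key (mid + 1) r = rest
        cases mn with
        | none =>
          cases rest with
          | none =>
            dsimp only
            rw [pvMnUp_none, pvComb_some_none, pvComb_none_some]
          | some rv =>
            dsimp only
            rw [pvMnUp_none, pvComb_some_some]
            split_ifs <;> simp only [pvComb_none_some] <;> first | rfl | omega
        | some p =>
          obtain ⟨d, i⟩ := p
          rw [pvMnUp_some]
          cases rest with
          | none =>
            dsimp only
            split_ifs with h1 <;>
              simp only [pvComb_some_none, pvComb_some_some] <;> split_ifs <;> first | rfl | omega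
          | some rv =>
            dsimp only
            split_ifs with h1 <;>
              simp only [pvComb_some_some, pvComb_some_some] <;> split_ifs <;> first | rfl | omega
      · -- arr[mid] = key: A breaks, B returns arr[mid]
        rw [if_pos (by omega), if_pos hc]
        cases mn with
        | none => rw [pvMnUp_none, pvComb_none_some]; rfl
        | some p =>
          obtain ⟨d, i⟩ := p
          have h0 : |pvG arr mid - key| = 0 := by rw [hc]; simp
          rw [pvMnUp_some, h0, pvComb_some_some, h0]
          split_ifs with h1 <;> rfl
      · -- arr[mid] > key: both recurse left
        rw [if_neg (by omega), if_neg (by omega), if_neg (by omega), if_neg (by omega),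
          ih l (mid - 1) (pvMnUp arr key mid mn) (by omega)]
        generalize pvBgo arr key l (mid - 1) = rest
        cases mn with
        | none =>
          cases rest with
          | none =>
            dsimp only
            rw [pvMnUp_none, pvComb_some_none, pvComb_none_some]
          | some rv =>
            dsimp only
            rw [pvMnUp_none, pvComb_some_some]
            split_ifs <;> simp only [pvComb_none_some] <;> first | rfl | omega
        | some p =>
          obtain ⟨d, i⟩ := p
          rw [pvMnUp_some]
          cases rest with
          | none =>
            dsimp only
            split_ifs with h1 <;>
              simp only [pvComb_some_none, pvComb_some_some] <;> split_ifs <;> first | rfl | omega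
          | some rv =>
            dsimp only
            split_ifs with h1 <;>
              simp only [pvComb_some_some, pvComb_some_some] <;> split_ifs <;> first | rfl | omega
    · rw [pvAloop_end arr key l r mn hle, pvBgo_end arr key l r hle]
      cases mn with
      | none => rfl
      | some p => obtain ⟨d, i⟩ := p; rfl

-- ===== VERDICT (by name: the statement is the Claim_ definition above) =====
theorem search_min_diff_element_spec : Claim_equal_search_min_diff_element := by
  intro arr key _hdom hpre
  have hn : 0 < (arr.length : Int) := by
    cases arr with
    | nil => exact absurd rfl hpre
    | cons a l => simp
  unfold Spec_search_min_diff_element search_min_diff_element search_min_diff_element_alt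
  have hmain := pv_main arr key ((arr.length : Int) - 1 + 1 - 0).toNat 0 ((arr.length : Int) - 1)
    none le_rfl
  have hsome := pvBgo_isSome arr key ((arr.length : Int) - 1 + 1 - 0).toNat 0
    ((arr.length : Int) - 1) le_rfl (by omega)
  obtain ⟨v, hv⟩ := Option.isSome_iff_exists.mp hsome
  show pvARet arr (pvAloop arr key 0 ((arr.length : Int) - 1) none) = _
  rw [hmain, hv]
  rfl
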